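-- pv_equiv track=rewrite | github.com/Lander37/Robot-Simulator | mapdescriptor.py | generateMapDescriptor
-- ===== SOURCE A (Python) =====
-- import copy
--
-- def get_hex(ar):
--     """Get hex value of the binary map"""
--     current = 0
--     val = 8
--     ans = ''
--     if(len(ar) % 4 != 0):
--         return ""
--     for i in range(len(ar)):
--         current = current + val * ar[i]
--         val //= 2
--         if(val == 0):
--             ans = ans + hex(current)[2:]
--             val = 8
--             current = 0
--     return ans
--
-- def generateMapDescriptor(resultMap):
--     """Generate map descriptor"""
--     temp = copy.copy(resultMap)
--     mapDescriptor = [1,1]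
--     for i in range(len(temp) - 1, -1, -1):
--     # for i in range(len(temp)):
--         for j in range(len(temp[i])):
--             if temp[i][j] == -1:
--                 mapDescriptor.append(0)
--             else:
--                 mapDescriptor.append(1)
--     mapDescriptor += [1,1]
--     return get_hex(mapDescriptor)
-- ===== SOURCE B (Python) =====
-- def generateMapDescriptor(resultMap):
--     """Generate map descriptor"""
--     bits = '11'
--     for row in reversed(resultMap):
--         for cell in row:
--             bits += '0' if cell == -1 else '1'
--     bits += '11'
--     if len(bits) % 4 != 0:
--         return ''
--     ans = ''
--     while bits:
--         ans += '%x' % int(bits[:4], 2)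
--         bits = bits[4:]
--     return ans
-- ===== Notes on version B (the rewrite author's own statement) =====
-- stated objective: idiomatic
-- what changed: A appends 0/1 ints via index loops and runs a weighted-accumulator state machine (val 8,4,2,1 with flush/reset) over them; B builds the bit string directly with reversed() iteration and then consumes it nibble by nibble, converting each 4-bit chunk with int(chunk, 2) and '%x'.
import Mathlib
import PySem

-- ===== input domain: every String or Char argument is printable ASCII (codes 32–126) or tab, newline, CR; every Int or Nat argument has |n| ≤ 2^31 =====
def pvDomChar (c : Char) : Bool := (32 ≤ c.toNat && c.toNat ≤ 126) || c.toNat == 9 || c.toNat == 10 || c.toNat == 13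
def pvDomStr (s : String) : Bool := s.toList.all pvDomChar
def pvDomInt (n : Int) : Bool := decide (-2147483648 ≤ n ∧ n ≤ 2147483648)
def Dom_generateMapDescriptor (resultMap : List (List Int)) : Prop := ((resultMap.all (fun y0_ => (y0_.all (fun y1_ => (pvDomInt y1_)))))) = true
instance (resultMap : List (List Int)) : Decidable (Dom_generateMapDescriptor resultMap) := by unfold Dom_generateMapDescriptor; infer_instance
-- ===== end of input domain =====

-- B replaces A's per-element weighted accumulator (a hex digit flushed whenever the
-- weight reaches 0) by building the bit string directly and converting it nibble by
-- nibble; same cost, a more idiomatic decomposition.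

-- hex digit character for 0 ≤ n ≤ 15, lowercase (Python's hex(n)[2:] / '%x' % n);
-- each port only ever passes values in that range.
def hexDigit (n : Int) : Char :=
  if n < 10 then Char.ofNat (48 + n.toNat) else Char.ofNat (87 + n.toNat)

-- ===== PORT A =====
-- get_hex's loop body: weighted accumulator, flushing a hex digit every 4 bits
def getHexStep (st : Int × Int × List Char) (b : Int) : Int × Int × List Char :=
  let current := st.1 + st.2.1 * b
  let val := PySem.Int.floordiv st.2.1 2
  if val = 0 then (0, 8, st.2.2 ++ [hexDigit current])
  else (current, val, st.2.2)

def getHex (ar : List Int) : String :=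
  if ar.length % 4 ≠ 0 then "" else
    String.ofList (ar.foldl getHexStep (0, 8, ([] : List Char))).2.2

-- temp = copy.copy(resultMap) is resultMap itself (the copy is never mutated)
def generateMapDescriptor (resultMap : List (List Int)) : String :=
  getHex
    (((PySem.List.pyRange ((resultMap.length : Int) - 1) (-1) (-1)).foldl
      (fun md i =>
        let row := PySem.List.pyGetD resultMap i []
        (PySem.List.pyRange 0 (row.length : Int) 1).foldl
          (fun md j =>
            if PySem.List.pyGetD row j 0 = -1 then md ++ [(0 : Int)]
            else md ++ [(1 : Int)]) md)
      [1, 1]) ++ [1, 1])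

-- ===== PORT B =====
-- int(cs, 2) for a string of '0'/'1' characters (exact on such strings, the only ones B forms)
def binVal (cs : List Char) : Int :=
  cs.foldl (fun a c => 2 * a + (if c = '1' then 1 else 0)) 0

-- the 'while bits:' loop: append '%x' % int(bits[:4], 2) to acc, continue on bits[4:]
def hexLoop (acc : List Char) : List Char → List Char
  | [] => acc
  | c :: rest => hexLoop (acc ++ [hexDigit (binVal (c :: rest.take 3))]) (rest.drop 3)
  termination_by bits => bits.length
  decreasing_by simp

def generateMapDescriptor_alt (resultMap : List (List Int)) : String :=
  if ((resultMap.reverse.foldl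
        (fun bits row =>
          row.foldl (fun bits cell => bits ++ [if cell = -1 then '0' else '1']) bits)
        ['1', '1']) ++ ['1', '1']).length % 4 ≠ 0 then ""
  else
    String.ofList (hexLoop []
      ((resultMap.reverse.foldl
        (fun bits row =>
          row.foldl (fun bits cell => bits ++ [if cell = -1 then '0' else '1']) bits)
        ['1', '1']) ++ ['1', '1']))

-- ===== PRECONDITION & SPEC =====
def Spec_generateMapDescriptor (resultMap : List (List Int)) (out : String) : Prop := out = generateMapDescriptor_alt resultMap
instance (resultMap : List (List Int)) (out : String) : Decidable (Spec_generateMapDescriptor resultMap out) := by unfold Spec_generateMapDescriptor; infer_instance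

-- ===== CLAIM (what is proved, stated in full; the proofs are below) =====
def Claim_equal_generateMapDescriptor : Prop := ∀ (resultMap : List (List Int)), Dom_generateMapDescriptor resultMap → Spec_generateMapDescriptor resultMap (generateMapDescriptor resultMap)

-- ===== LEMMAS AND PROOFS =====

-- the bit sequence both programs flatten out, as Booleans (true = the cell is -1)
def bitsB (resultMap : List (List Int)) : List Bool :=
  resultMap.reverse.flatMap (fun row => row.map (fun c => decide (c = -1)))

def iOf (b : Bool) : Int := if b then 0 else 1
def cOf (b : Bool) : Char := if b then '0' else '1'

lemma outer_rev (xs : List (List Int)) (G : List Int → List Int → List Int) (init : List Int) :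
    (PySem.List.pyRange 0 (xs.length : Int) 1).reverse.foldl
      (fun md i => G md (PySem.List.pyGetD xs i [])) init
    = xs.reverse.foldl G init := by
  conv_rhs => rw [← PySem.List.map_pyGetD_pyRange_zero' xs ([] : List Int)]
  rw [← List.map_reverse, List.foldl_map]

-- A's accumulated list is the framed bit sequence as 0/1 ints
lemma md_eq (resultMap : List (List Int)) :
    (PySem.List.pyRange ((resultMap.length : Int) - 1) (-1) (-1)).foldl
      (fun md i =>
        let row := PySem.List.pyGetD resultMap i []
        (PySem.List.pyRange 0 (row.length : Int) 1).foldl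
          (fun md j =>
            if PySem.List.pyGetD row j 0 = -1 then md ++ [(0 : Int)]
            else md ++ [(1 : Int)]) md)
      [1, 1]
    = [1, 1] ++ (bitsB resultMap).map iOf := by
  have h1 : PySem.List.pyRange ((resultMap.length : Int) - 1) (-1) (-1)
      = (PySem.List.pyRange 0 (resultMap.length : Int) 1).reverse := by
    rw [PySem.List.pyRange_neg_one_eq_reverse]; norm_num
  rw [h1]
  rw [outer_rev resultMap
    (fun md row =>
      (PySem.List.pyRange 0 (row.length : Int) 1).foldl
        (fun md j =>
          if PySem.List.pyGetD row j 0 = -1 then md ++ [(0 : Int)]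
          else md ++ [(1 : Int)]) md) [1, 1]]
  have hrow : ∀ (row : List Int) (md : List Int),
      (PySem.List.pyRange 0 (row.length : Int) 1).foldl
        (fun md j =>
          if PySem.List.pyGetD row j 0 = -1 then md ++ [(0 : Int)]
          else md ++ [(1 : Int)]) md
      = md ++ row.map (fun c => iOf (decide (c = -1))) := by
    intro row md
    rw [PySem.List.foldl_pyRange_zero_pyGetD' row 0
      (fun md c => if c = -1 then md ++ [(0 : Int)] else md ++ [(1 : Int)]) md]
    have h2 : row.foldl (fun md c => if c = -1 then md ++ [(0 : Int)] else md ++ [(1 : Int)]) md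
        = row.foldl (fun md c => md ++ [iOf (decide (c = -1))]) md := by
      apply PySem.List.foldl_congr_mem
      intro acc c _
      by_cases h : c = -1 <;> simp [h, iOf]
    rw [h2, PySem.List.foldl_append_singleton_eq_map]
  trans (resultMap.reverse.foldl
      (fun md row => md ++ row.map (fun c => iOf (decide (c = -1)))) [1, 1])
  · apply PySem.List.foldl_congr_mem; intro acc x _; exact hrow x acc
  · rw [PySem.List.foldl_append_eq_flatMap]
    simp [bitsB, List.map_flatMap, List.map_map, Function.comp_def]

-- B's accumulated bit characters are the same sequence as '0'/'1' chars
lemma bits_eq (resultMap : List (List Int)) :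
    (resultMap.reverse.foldl
      (fun bits row =>
        row.foldl (fun bits cell => bits ++ [if cell = -1 then '0' else '1']) bits)
      ['1', '1'])
    = ['1', '1'] ++ (bitsB resultMap).map cOf := by
  have hrow : ∀ (row : List Int) (acc : List Char),
      row.foldl (fun bits cell => bits ++ [if cell = -1 then '0' else '1']) acc
        = acc ++ row.map (fun c => cOf (decide (c = -1))) := by
    intro row acc
    rw [PySem.List.foldl_append_singleton_eq_map]
    congr 1; apply List.map_congr_left; intro c _
    by_cases h : c = -1 <;> simp [h, cOf]
  trans (resultMap.reverse.foldl
      (fun bits row => bits ++ row.map (fun c => cOf (decide (c = -1)))) ['1', '1'])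
  · apply PySem.List.foldl_congr_mem; intro acc x _; exact hrow x acc
  · rw [PySem.List.foldl_append_eq_flatMap]
    simp [bitsB, List.map_flatMap, List.map_map, Function.comp_def]

lemma getHexStep_8 (ans : List Char) (b : Int) :
    getHexStep (0, 8, ans) b = (8 * b, 4, ans) := by
  simp [getHexStep]

lemma getHexStep_4 (c : Int) (ans : List Char) (b : Int) :
    getHexStep (c, 4, ans) b = (c + 4 * b, 2, ans) := by
  simp [getHexStep]

lemma getHexStep_2 (c : Int) (ans : List Char) (b : Int) :
    getHexStep (c, 2, ans) b = (c + 2 * b, 1, ans) := by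
  simp [getHexStep]

lemma getHexStep_1 (c : Int) (ans : List Char) (b : Int) :
    getHexStep (c, 1, ans) b = (0, 8, ans ++ [hexDigit (c + 1 * b)]) := by
  simp [getHexStep]

lemma binVal_nibble (b0 b1 b2 b3 : Bool) :
    binVal [cOf b0, cOf b1, cOf b2, cOf b3]
      = 8 * iOf b0 + 4 * iOf b1 + 2 * iOf b2 + 1 * iOf b3 := by
  cases b0 <;> cases b1 <;> cases b2 <;> cases b3 <;> decide

lemma hexLoop_cons4 (ans : List Char) (c0 c1 c2 c3 : Char) (cs : List Char) :
    hexLoop ans (c0 :: c1 :: c2 :: c3 :: cs)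
      = hexLoop (ans ++ [hexDigit (binVal [c0, c1, c2, c3])]) cs := by
  rw [hexLoop.eq_def]
  simp

-- the weighted state machine over the 0/1 ints equals nibble-chunking over the chars
lemma gh_loop : ∀ (n : Nat) (bl : List Bool), bl.length = 4 * n → ∀ (ans : List Char),
    (bl.map iOf).foldl getHexStep (0, 8, ans) = (0, 8, hexLoop ans (bl.map cOf)) := by
  intro n
  induction n with
  | zero =>
      intro bl h ans
      have : bl = [] := List.eq_nil_of_length_eq_zero (by omega)
      subst this
      rw [hexLoop.eq_def]
      simp
  | succ n ih =>
      intro bl h ans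
      match bl with
      | b0 :: b1 :: b2 :: b3 :: t =>
        have ht : t.length = 4 * n := by simp at h; omega
        simp only [List.map_cons, List.foldl_cons,
          getHexStep_8, getHexStep_4, getHexStep_2, getHexStep_1]
        rw [ih t ht, hexLoop_cons4, binVal_nibble]

-- ===== VERDICT (by name: the statement is the Claim_ definition above) =====
theorem generateMapDescriptor_spec : Claim_equal_generateMapDescriptor := by
  intro resultMap _
  unfold Spec_generateMapDescriptor generateMapDescriptor generateMapDescriptor_alt
  rw [md_eq, bits_eq]
  set fl := bitsB resultMap with hfl
  unfold getHex
  have hlenA : ([1, 1] ++ fl.map iOf ++ [1, 1]).length = fl.length + 4 := by simp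
  have hlenB : ((['1', '1'] ++ fl.map cOf) ++ ['1', '1']).length = fl.length + 4 := by simp
  have hmod : (fl.length + 4) % 4 = fl.length % 4 := by omega
  rw [hlenA, hlenB, hmod]
  by_cases h4 : fl.length % 4 = 0
  · obtain ⟨n, hn⟩ : ∃ n, fl.length + 4 = 4 * n := ⟨fl.length / 4 + 1, by omega⟩
    have hfull : ((false :: false :: fl ++ [false, false]) : List Bool).length = 4 * n := by
      simp; omega
    have hmapI : ([1, 1] ++ fl.map iOf ++ [1, 1])
        = (false :: false :: fl ++ [false, false]).map iOf := by simp [iOf]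
    have hmapC : ((['1', '1'] ++ fl.map cOf) ++ ['1', '1'])
        = (false :: false :: fl ++ [false, false]).map cOf := by simp [cOf]
    rw [if_neg (not_not_intro h4), if_neg (not_not_intro h4)]
    rw [hmapI, hmapC, gh_loop n _ hfull]
  · rw [if_pos h4, if_pos h4]
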